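-- pv_equiv track=rewrite | github.com/jacksonmluckey/jurisdiction-utility-approval-simulation | city/generation.py | _add_block_with_width
-- ===== SOURCE A (Python) =====
-- from typing import List, Tuple, Optional, Set
--
-- def _add_block_with_width(
--     row: int,
--     col: int,
--     width: int,
--     grid_rows: int,
--     grid_cols: int
-- ) -> Set[Tuple[int, int]]:
--     """Add a block and its neighbors based on corridor width."""
--     blocks = set()
--     half_width = width // 2
--
--     for dr in range(-half_width, half_width + 1):
--         for dc in range(-half_width, half_width + 1):
--             new_row = row + dr
--             new_col = col + dc
--
--             if 0 <= new_row < grid_rows and 0 <= new_col < grid_cols: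
--                 blocks.add((new_row, new_col))
--
--     return blocks
-- ===== SOURCE B (Python) =====
-- def _add_block_with_width(row, col, width, grid_rows, grid_cols):
--     """Clip the window to the grid, then decode linear indices 0..nr*nc-1 with divmod."""
--     half = width // 2
--     r0 = max(0, row - half)
--     nr = min(grid_rows, row + half + 1) - r0
--     c0 = max(0, col - half)
--     nc = min(grid_cols, col + half + 1) - c0
--     if nr <= 0 or nc <= 0:
--         return set()
--     return {(r0 + i // nc, c0 + i % nc) for i in range(nr * nc)}
-- ===== Notes on version B (the rewrite author's own statement) =====
-- stated objective: alternative
-- what changed: Replaces the nested offset loops with per-cell bounds tests by clipping the window to the grid arithmetically and then decoding a single flat loop over linear indices 0..nr*nc-1 with divmod into (row, col) pairs.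
import Mathlib
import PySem

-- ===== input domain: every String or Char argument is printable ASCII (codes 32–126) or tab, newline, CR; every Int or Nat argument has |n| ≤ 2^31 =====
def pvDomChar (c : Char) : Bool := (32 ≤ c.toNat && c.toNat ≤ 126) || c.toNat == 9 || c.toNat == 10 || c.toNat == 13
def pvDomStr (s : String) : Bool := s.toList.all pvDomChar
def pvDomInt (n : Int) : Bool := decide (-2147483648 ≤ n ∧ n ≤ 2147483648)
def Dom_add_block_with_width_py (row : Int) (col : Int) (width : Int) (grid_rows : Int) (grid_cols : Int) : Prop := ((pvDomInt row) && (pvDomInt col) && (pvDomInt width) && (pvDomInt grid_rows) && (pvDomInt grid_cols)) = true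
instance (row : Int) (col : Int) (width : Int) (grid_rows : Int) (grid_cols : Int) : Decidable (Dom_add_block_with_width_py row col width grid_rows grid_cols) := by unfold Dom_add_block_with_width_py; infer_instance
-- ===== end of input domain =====

-- B clips the window to the grid arithmetically and then decodes one flat loop over
-- linear indices 0..nr*nc-1 with divmod, instead of A's nested offset loops with a
-- per-cell bounds test (objective: alternative).

-- ===== PORT A =====
def add_block_with_width_py (row : Int) (col : Int) (width : Int) (grid_rows : Int) (grid_cols : Int) : List (Int × Int) :=
  let half_width := PySem.Int.floordiv width 2
  (PySem.List.pyRange (-half_width) (half_width + 1) 1).foldl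
    (fun blocks dr =>
      (PySem.List.pyRange (-half_width) (half_width + 1) 1).foldl
        (fun blocks dc =>
          let new_row := row + dr
          let new_col := col + dc
          if 0 ≤ new_row ∧ new_row < grid_rows ∧ 0 ≤ new_col ∧ new_col < grid_cols then
            PySem.Set.add blocks (new_row, new_col)
          else blocks)
        blocks)
    PySem.Set.empty

-- ===== PORT B =====
def add_block_with_width_py_alt (row : Int) (col : Int) (width : Int) (grid_rows : Int) (grid_cols : Int) : List (Int × Int) :=
  let half := PySem.Int.floordiv width 2
  let r0 := max 0 (row - half)
  let nr := min grid_rows (row + half + 1) - r0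
  let c0 := max 0 (col - half)
  let nc := min grid_cols (col + half + 1) - c0
  if nr ≤ 0 ∨ nc ≤ 0 then PySem.Set.empty
  else
    PySem.Set.ofList
      ((PySem.List.pyRange 0 (nr * nc) 1).map
        (fun i => (r0 + PySem.Int.floordiv i nc, c0 + PySem.Int.mod i nc)))

-- ===== PRECONDITION & SPEC =====
def Spec_add_block_with_width_py (row : Int) (col : Int) (width : Int) (grid_rows : Int) (grid_cols : Int) (out : List (Int × Int)) : Prop := out = add_block_with_width_py_alt row col width grid_rows grid_cols
instance (row : Int) (col : Int) (width : Int) (grid_rows : Int) (grid_cols : Int) (out : List (Int × Int)) : Decidable (Spec_add_block_with_width_py row col width grid_rows grid_cols out) := by unfold Spec_add_block_with_width_py; infer_instance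

-- ===== CLAIM (what is proved, stated in full; the proofs are below) =====
def Claim_equal_add_block_with_width_py : Prop := ∀ (row : Int) (col : Int) (width : Int) (grid_rows : Int) (grid_cols : Int), Dom_add_block_with_width_py row col width grid_rows grid_cols → Spec_add_block_with_width_py row col width grid_rows grid_cols (add_block_with_width_py row col width grid_rows grid_cols)

-- ===== LEMMAS AND PROOFS =====

-- Clipping an increasing integer range by an interval is the intersected range.
lemma filter_pyRange (a b lo hi : Int) :
    (PySem.List.pyRange a b 1).filter (fun x => decide (lo ≤ x ∧ x < hi))
      = PySem.List.pyRange (max a lo) (min b hi) 1 := by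
  have hpl : ((PySem.List.pyRange a b 1).filter
      (fun x => decide (lo ≤ x ∧ x < hi))).Pairwise (· < ·) :=
    (PySem.List.pairwise_lt_pyRange_one a b).sublist List.filter_sublist
  have hpr := PySem.List.pairwise_lt_pyRange_one (max a lo) (min b hi)
  have hnl : ((PySem.List.pyRange a b 1).filter
      (fun x => decide (lo ≤ x ∧ x < hi))).Nodup := hpl.imp (fun h => ne_of_lt h)
  have hnr := hpr.imp (fun {x y} (h : x < y) => ne_of_lt h)
  have hmem : ∀ x, x ∈ (PySem.List.pyRange a b 1).filter (fun x => decide (lo ≤ x ∧ x < hi))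
      ↔ x ∈ PySem.List.pyRange (max a lo) (min b hi) 1 := by
    intro x
    simp only [List.mem_filter, PySem.List.mem_pyRange_one, decide_eq_true_eq]
    omega
  exact List.Perm.eq_of_pairwise
    (fun a b _ _ (h1 : a < b) (h2 : b < a) => absurd h2 (not_lt.2 (le_of_lt h1)))
    hpl hpr ((List.perm_ext_iff_of_nodup hnl hnr).2 hmem)

-- Translating an increasing range.
lemma map_add_pyRange (t a b : Int) :
    (PySem.List.pyRange a b 1).map (fun x => t + x) = PySem.List.pyRange (t + a) (t + b) 1 := by
  rw [PySem.List.pyRange_one a b, PySem.List.pyRange_one (t + a) (t + b), List.map_map]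
  have h : (t + b - (t + a)).toNat = (b - a).toNat := by omega
  rw [h]
  exact List.map_congr_left (fun k _ => by simp [Function.comp]; ring)

-- Folding Set.add over a duplicate-free list of fresh elements appends it.
lemma foldl_set_add_fresh {α : Type} [BEq α] [LawfulBEq α] :
    ∀ (l : List α) (s : List α), l.Nodup → (∀ x ∈ l, x ∉ s) →
      l.foldl PySem.Set.add s = s ++ l := by
  intro l
  induction l with
  | nil => intro s _ _; simp
  | cons x xs ih =>
    intro s hnd hfresh
    simp only [List.foldl_cons]
    rw [PySem.Set.add_of_not_mem (hfresh x (List.mem_cons_self))]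
    rw [ih (s ++ [x]) hnd.of_cons]
    · simp
    · intro y hy
      simp only [List.mem_append, List.mem_singleton]
      rintro (h | rfl)
      · exact hfresh y (List.mem_cons_of_mem _ hy) h
      · exact (List.nodup_cons.1 hnd).1 hy

-- The inner dc-loop of A, characterised.
lemma inner_loop (row col grid_rows grid_cols hw dr : Int) (blocks : List (Int × Int))
    (hfresh : ∀ c, (row + dr, c) ∉ blocks) :
    (PySem.List.pyRange (-hw) (hw + 1) 1).foldl
      (fun blocks dc =>
        if 0 ≤ row + dr ∧ row + dr < grid_rows ∧ 0 ≤ col + dc ∧ col + dc < grid_cols then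
          PySem.Set.add blocks (row + dr, col + dc)
        else blocks) blocks
    = if 0 ≤ row + dr ∧ row + dr < grid_rows then
        blocks ++ (PySem.List.pyRange (max 0 (col - hw)) (min grid_cols (col + hw + 1)) 1).map
          (fun c => (row + dr, c))
      else blocks := by
  rw [PySem.List.foldl_ite_eq_foldl_filter]
  by_cases hrow : 0 ≤ row + dr ∧ row + dr < grid_rows
  · rw [if_pos hrow]
    have hfc : (PySem.List.pyRange (-hw) (hw + 1) 1).filter
        (fun dc => decide (0 ≤ row + dr ∧ row + dr < grid_rows ∧ 0 ≤ col + dc ∧ col + dc < grid_cols))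
        = (PySem.List.pyRange (-hw) (hw + 1) 1).filter
        (fun dc => decide ((-col) ≤ dc ∧ dc < grid_cols - col)) := by
      refine List.filter_congr (fun x _ => ?_)
      apply decide_eq_decide.2
      constructor
      · rintro ⟨_, _, h3, h4⟩; omega
      · rintro ⟨h1, h2⟩; exact ⟨hrow.1, hrow.2, by omega, by omega⟩
    rw [hfc, filter_pyRange]
    rw [← List.foldl_map]
    rw [foldl_set_add_fresh]
    · congr 1
      have : (fun dc => ((row + dr : Int), col + dc)) =
          (fun c => ((row + dr : Int), c)) ∘ (fun dc => col + dc) := rfl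
      rw [this, ← List.map_map, map_add_pyRange]
      congr 2 <;> omega
    · refine (PySem.List.nodup_pyRange_one _ _).map ?_
      intro x y hxy
      simpa using hxy
    · intro p hp
      simp only [List.mem_map] at hp
      obtain ⟨dc, _, rfl⟩ := hp
      exact hfresh _
  · rw [if_neg hrow]
    have : (PySem.List.pyRange (-hw) (hw + 1) 1).filter
        (fun dc => decide (0 ≤ row + dr ∧ row + dr < grid_rows ∧ 0 ≤ col + dc ∧ col + dc < grid_cols)) = [] := by
      refine List.filter_eq_nil_iff.2 (fun x _ => ?_)
      simp only [decide_eq_true_eq]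
      rintro ⟨h1, h2, _⟩; exact hrow ⟨h1, h2⟩
    rw [this, List.foldl_nil]

-- The outer dr-loop of A, characterised.
lemma outer_loop (row col grid_rows grid_cols hw : Int) :
    ∀ (drs : List Int) (blocks : List (Int × Int)), drs.Nodup →
      (∀ dr ∈ drs, ∀ p ∈ blocks, p.1 ≠ row + dr) →
      drs.foldl
        (fun blocks dr =>
          (PySem.List.pyRange (-hw) (hw + 1) 1).foldl
            (fun blocks dc =>
              if 0 ≤ row + dr ∧ row + dr < grid_rows ∧ 0 ≤ col + dc ∧ col + dc < grid_cols then
                PySem.Set.add blocks (row + dr, col + dc)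
              else blocks) blocks) blocks
      = blocks ++
          (drs.filter (fun dr => decide (0 ≤ row + dr ∧ row + dr < grid_rows))).flatMap
            (fun dr => (PySem.List.pyRange (max 0 (col - hw)) (min grid_cols (col + hw + 1)) 1).map
              (fun c => (row + dr, c))) := by
  intro drs
  induction drs with
  | nil => intro blocks _ _; simp
  | cons dr rest ih =>
    intro blocks hnd hfresh
    simp only [List.foldl_cons]
    rw [inner_loop row col grid_rows grid_cols hw dr blocks
      (fun c hc => hfresh dr List.mem_cons_self _ hc rfl)]
    by_cases hrow : 0 ≤ row + dr ∧ row + dr < grid_rows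
    · rw [if_pos hrow, ih _ hnd.of_cons, List.filter_cons_of_pos (by simpa using hrow),
        List.flatMap_cons, List.append_assoc]
      intro dr' hdr' p hp
      rcases List.mem_append.1 hp with h | h
      · exact hfresh dr' (List.mem_cons_of_mem _ hdr') p h
      · simp only [List.mem_map] at h
        obtain ⟨c, _, rfl⟩ := h
        have : dr ≠ dr' := fun h => (List.nodup_cons.1 hnd).1 (h ▸ hdr')
        simp only []
        omega
    · rw [if_neg hrow, ih _ hnd.of_cons, List.filter_cons_of_neg (by simpa using hrow)]
      intro dr' hdr' p hp
      exact hfresh dr' (List.mem_cons_of_mem _ hdr') p hp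

-- The row-by-row rectangle enumeration (rows shifted by t) has no duplicates.
lemma flat_nodup (t a b c0 c1 : Int) :
    ((PySem.List.pyRange a b 1).flatMap
      (fun q => (PySem.List.pyRange c0 c1 1).map (fun c => (t + q, c)))).Nodup := by
  refine List.nodup_flatMap.2 ⟨?_, ?_⟩
  · intro r _
    refine (PySem.List.nodup_pyRange_one _ _).map ?_
    intro x y hxy; simpa using hxy
  · refine ((PySem.List.pairwise_lt_pyRange_one _ _).imp ?_)
    intro r1' r2' hlt p hp1 hp2
    simp only [List.mem_map] at hp1 hp2
    obtain ⟨a1, _, rfl⟩ := hp1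
    obtain ⟨a2, _, h⟩ := hp2
    have : t + r2' = t + r1' := congrArg Prod.fst h
    omega

-- A equals the row-by-row enumeration of the clipped rectangle.
lemma A_eq_flat (row col width grid_rows grid_cols : Int) :
    add_block_with_width_py row col width grid_rows grid_cols
      = (PySem.List.pyRange (max 0 (row - PySem.Int.floordiv width 2))
            (min grid_rows (row + PySem.Int.floordiv width 2 + 1)) 1).flatMap
          (fun r => (PySem.List.pyRange (max 0 (col - PySem.Int.floordiv width 2))
              (min grid_cols (col + PySem.Int.floordiv width 2 + 1)) 1).map
            (fun c => (r, c))) := by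
  unfold add_block_with_width_py
  set hw := PySem.Int.floordiv width 2 with hhw
  simp only []
  rw [show (PySem.Set.empty : List (Int × Int)) = [] from rfl]
  rw [outer_loop row col grid_rows grid_cols hw (PySem.List.pyRange (-hw) (hw + 1) 1) []
    (PySem.List.nodup_pyRange_one _ _) (by simp)]
  have hf : (PySem.List.pyRange (-hw) (hw + 1) 1).filter
      (fun dr => decide (0 ≤ row + dr ∧ row + dr < grid_rows))
      = (PySem.List.pyRange (-hw) (hw + 1) 1).filter
      (fun dr => decide ((-row) ≤ dr ∧ dr < grid_rows - row)) := by
    refine List.filter_congr (fun x _ => ?_)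
    apply decide_eq_decide.2
    omega
  rw [hf, filter_pyRange, List.nil_append]
  have hrows : PySem.List.pyRange (max 0 (row - hw)) (min grid_rows (row + hw + 1)) 1
      = (PySem.List.pyRange (max (-hw) (-row)) (min (hw + 1) (grid_rows - row)) 1).map
        (fun x => row + x) := by
    rw [map_add_pyRange]
    congr 1 <;> omega
  rw [hrows, List.flatMap_map]

-- Decoding one nc-wide chunk of linear indices gives one row of the rectangle.
lemma chunk_decode (r0 c0 nc q : Int) (hnc : 0 < nc) :
    (PySem.List.pyRange (q * nc) (q * nc + nc) 1).map
      (fun i => (r0 + PySem.Int.floordiv i nc, c0 + PySem.Int.mod i nc))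
    = (PySem.List.pyRange c0 (c0 + nc) 1).map (fun c => (r0 + q, c)) := by
  have h1 : PySem.List.pyRange (q * nc) (q * nc + nc) 1
      = (PySem.List.pyRange c0 (c0 + nc) 1).map (fun x => (q * nc - c0) + x) := by
    rw [map_add_pyRange]
    congr 1 <;> ring
  rw [h1, List.map_map]
  refine List.map_congr_left (fun x hx => ?_)
  rw [PySem.List.mem_pyRange_one] at hx
  have hrw : q * nc - c0 + x = (x - c0) + q * nc := by ring
  have hd : PySem.Int.floordiv (q * nc - c0 + x) nc = q := by
    rw [PySem.Int.floordiv_eq_ediv_of_pos hnc, hrw,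
      Int.add_mul_ediv_right _ _ (ne_of_gt hnc),
      Int.ediv_eq_zero_of_lt (by omega) (by omega), zero_add]
  have hm : PySem.Int.mod (q * nc - c0 + x) nc = x - c0 := by
    rw [PySem.Int.mod_eq_emod_of_pos hnc]
    have hrw' : q * nc - c0 + x = (x - c0) + nc * q := by ring
    rw [hrw', Int.add_mul_emod_self_left, Int.emod_eq_of_lt (by omega) (by omega)]
  simp only [Function.comp, hd, hm]
  congr 1
  omega

-- Splitting the flat index range into nc-wide chunks.
lemma lin_split {α : Type} (nc : Int) (hnc : 0 < nc) (f : Int → α) (nr : Int) :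
    (PySem.List.pyRange 0 (nr * nc) 1).map f
      = (PySem.List.pyRange 0 nr 1).flatMap
          (fun q => (PySem.List.pyRange (q * nc) (q * nc + nc) 1).map f) := by
  by_cases hnr : 0 ≤ nr
  · obtain ⟨n, rfl⟩ := Int.eq_ofNat_of_zero_le hnr
    induction n with
    | zero => simp [PySem.List.pyRange_one_eq_nil]
    | succ n ih =>
      have hc : ((n + 1 : Nat) : Int) = (n : Int) + 1 := by push_cast; ring
      have hsplit : PySem.List.pyRange 0 (((n : Int) + 1) * nc) 1
          = PySem.List.pyRange 0 ((n : Int) * nc) 1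
            ++ PySem.List.pyRange ((n : Int) * nc) (((n : Int) + 1) * nc) 1 :=
        PySem.List.pyRange_one_append 0 ((n : Int) * nc) (((n : Int) + 1) * nc)
          (mul_nonneg (Int.natCast_nonneg n) hnc.le) (by nlinarith)
      have hrows : PySem.List.pyRange 0 ((n : Int) + 1) 1
          = PySem.List.pyRange 0 (n : Int) 1 ++ [(n : Int)] :=
        PySem.List.pyRange_one_succ_right (Int.natCast_nonneg n)
      have heq : ((n : Int) + 1) * nc = (n : Int) * nc + nc := by ring
      rw [hc, hsplit, heq, List.map_append, ih (Int.natCast_nonneg n), hrows, List.flatMap_append,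
        List.flatMap_cons, List.flatMap_nil, List.append_nil]
  · have h1 : PySem.List.pyRange 0 (nr * nc) 1 = [] :=
      PySem.List.pyRange_one_eq_nil (by nlinarith)
    have h2 : PySem.List.pyRange 0 nr 1 = [] :=
      PySem.List.pyRange_one_eq_nil (by omega)
    rw [h1, h2]
    simp

-- B equals the same row-by-row enumeration of the clipped rectangle.
lemma B_eq_flat (row col width grid_rows grid_cols : Int) :
    add_block_with_width_py_alt row col width grid_rows grid_cols
      = (PySem.List.pyRange (max 0 (row - PySem.Int.floordiv width 2))
            (min grid_rows (row + PySem.Int.floordiv width 2 + 1)) 1).flatMap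
          (fun r => (PySem.List.pyRange (max 0 (col - PySem.Int.floordiv width 2))
              (min grid_cols (col + PySem.Int.floordiv width 2 + 1)) 1).map
            (fun c => (r, c))) := by
  unfold add_block_with_width_py_alt
  set hw := PySem.Int.floordiv width 2 with hhw
  set r0 := max 0 (row - hw) with hr0
  set c0 := max 0 (col - hw) with hc0
  set nr := min grid_rows (row + hw + 1) - r0 with hnr
  set nc := min grid_cols (col + hw + 1) - c0 with hnc
  simp only []
  by_cases hdeg : nr ≤ 0 ∨ nc ≤ 0
  · rw [if_pos hdeg]
    rcases hdeg with h | h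
    · rw [PySem.List.pyRange_one_eq_nil (show min grid_rows (row + hw + 1) ≤ r0 by omega)]
      rfl
    · have hcols : PySem.List.pyRange c0 (min grid_cols (col + hw + 1)) 1 = [] :=
        PySem.List.pyRange_one_eq_nil (by omega)
      rw [show (PySem.Set.empty : List (Int × Int)) = [] from rfl]
      symm
      rw [List.eq_nil_iff_forall_not_mem]
      intro p hp
      rw [List.mem_flatMap] at hp
      obtain ⟨r, _, hpr⟩ := hp
      rw [hcols] at hpr
      simp at hpr
  · rw [if_neg hdeg]
    rw [not_or, not_le, not_le] at hdeg
    obtain ⟨hnrp, hncp⟩ := hdeg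
    rw [lin_split nc (by omega) _ nr]
    have hchunks : (PySem.List.pyRange 0 nr 1).flatMap
        (fun q => (PySem.List.pyRange (q * nc) (q * nc + nc) 1).map
          (fun i => (r0 + PySem.Int.floordiv i nc, c0 + PySem.Int.mod i nc)))
        = (PySem.List.pyRange 0 nr 1).flatMap
          (fun q => (PySem.List.pyRange c0 (c0 + nc) 1).map (fun c => (r0 + q, c))) := by
      refine List.flatMap_congr (fun q _ => ?_)
      exact chunk_decode r0 c0 nc q (by omega)
    have hrows : PySem.List.pyRange r0 (min grid_rows (row + hw + 1)) 1
        = (PySem.List.pyRange 0 nr 1).map (fun x => r0 + x) := by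
      rw [map_add_pyRange]
      congr 1 <;> omega
    have hcols : c0 + nc = min grid_cols (col + hw + 1) := by omega
    rw [hchunks, ← hcols, hrows, List.flatMap_map]
    exact PySem.Set.ofList_eq_self_of_nodup _ (flat_nodup r0 0 nr c0 (c0 + nc))

-- ===== VERDICT (by name: the statement is the Claim_ definition above) =====
theorem add_block_with_width_py_spec : Claim_equal_add_block_with_width_py := by
  intro row col width grid_rows grid_cols _
  unfold Spec_add_block_with_width_py
  rw [A_eq_flat, B_eq_flat]
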